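-- pv_equiv track=rewrite | github.com/sabaimran/classify-articulate | typographical/generate_data.py | get_decimal_samples
-- ===== SOURCE A (Python) =====
-- from typing import List
--
-- def get_decimal_samples(base_sentences: List[str], target_count=60):
--     """
--     Select negative and positive samples from the base sentences that contain decimal numbers.
--     """
--     negative_sentences = []
--     positive_sentences = []
--
--     for s in base_sentences:
--         if any(char.isdigit() for char in s):
--             positive_sentences.append(s)
--         else:
--             negative_sentences.append(s)
--
--         if len(negative_sentences) >= target_count and len(positive_sentences) >= target_count:
--             break
--
--     return negative_sentences[:target_count], positive_sentences[:target_count]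
-- ===== SOURCE B (Python) =====
-- from typing import List
--
-- def get_decimal_samples(base_sentences: List[str], target_count=60):
--     """
--     Select negative and positive samples from the base sentences that contain decimal numbers.
--     """
--     positive_sentences = [s for s in base_sentences if any(c.isdigit() for c in s)]
--     negative_sentences = [s for s in base_sentences if not any(c.isdigit() for c in s)]
--     return negative_sentences[:target_count], positive_sentences[:target_count]
-- ===== Notes on version B (the rewrite author's own statement) =====
-- stated objective: simpler
-- what changed: Replaced the single stateful early-exiting loop with two declarative full-scan comprehensions (one per class) followed by slicing; the early break becomes invisible under the [:target_count] slices.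
-- outside the precondition, e.g. on get_decimal_samples(['a1', 'b2'], -1): A returns ([], []), B returns ([], ['a1'])
import Mathlib
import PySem

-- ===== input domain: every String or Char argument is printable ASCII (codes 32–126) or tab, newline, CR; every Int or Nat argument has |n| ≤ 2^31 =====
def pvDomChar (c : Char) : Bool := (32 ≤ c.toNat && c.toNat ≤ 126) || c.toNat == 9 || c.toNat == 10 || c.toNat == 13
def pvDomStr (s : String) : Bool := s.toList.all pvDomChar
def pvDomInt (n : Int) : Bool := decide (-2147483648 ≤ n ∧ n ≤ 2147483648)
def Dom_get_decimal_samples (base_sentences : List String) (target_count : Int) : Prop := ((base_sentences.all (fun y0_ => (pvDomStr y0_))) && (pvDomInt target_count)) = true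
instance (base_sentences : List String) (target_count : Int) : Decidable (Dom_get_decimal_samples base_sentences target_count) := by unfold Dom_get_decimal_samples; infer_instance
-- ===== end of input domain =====

-- B replaces the single early-exiting stateful loop with two full-scan filters plus slicing (simpler decomposition, same values).
-- ===== PORT A =====
def pvHasDigit (s : String) : Bool := s.toList.any PySem.Chars.isdigit

def pvALoop (target_count : Int) : List String → List String → List String → List String × List String
  | [], negative_sentences, positive_sentences => (negative_sentences, positive_sentences)
  | s :: rest, negative_sentences, positive_sentences =>
    let negative' := if pvHasDigit s then negative_sentences else negative_sentences ++ [s]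
    let positive' := if pvHasDigit s then positive_sentences ++ [s] else positive_sentences
    if target_count ≤ PySem.List.len negative' ∧ target_count ≤ PySem.List.len positive' then
      (negative', positive')
    else
      pvALoop target_count rest negative' positive'

def get_decimal_samples (base_sentences : List String) (target_count : Int) : List String × List String :=
  let r := pvALoop target_count base_sentences [] []
  (PySem.List.slice r.1 none (some target_count), PySem.List.slice r.2 none (some target_count))

-- ===== PORT B =====
def get_decimal_samples_alt (base_sentences : List String) (target_count : Int) : List String × List String :=
  let positive_sentences := base_sentences.filter (fun s => s.toList.any PySem.Chars.isdigit)
  let negative_sentences := base_sentences.filter (fun s => !(s.toList.any PySem.Chars.isdigit))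
  (PySem.List.slice negative_sentences none (some target_count),
   PySem.List.slice positive_sentences none (some target_count))

-- ===== PRECONDITION & SPEC =====
-- Pre_ excludes negative target_count (outside the function's natural domain of sample counts) when either
-- class holds more than -target_count sentences: there A's early break interacts with Python's
-- negative-slice semantics to accidentally return ([], []).
def Pre_get_decimal_samples (base_sentences : List String) (target_count : Int) : Prop :=
  0 ≤ target_count ∨
    (base_sentences.countP (fun s => s.toList.any PySem.Chars.isdigit) ≤ (-target_count).toNat ∧
     base_sentences.countP (fun s => !(s.toList.any PySem.Chars.isdigit)) ≤ (-target_count).toNat)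
instance (base_sentences : List String) (target_count : Int) : Decidable (Pre_get_decimal_samples base_sentences target_count) := by unfold Pre_get_decimal_samples; infer_instance
def pvWitness_get_decimal_samples : List String × Int := (["a1", "b2", "c"], 1)
def Spec_get_decimal_samples (base_sentences : List String) (target_count : Int) (out : List String × List String) : Prop := out = get_decimal_samples_alt base_sentences target_count
instance (base_sentences : List String) (target_count : Int) (out : List String × List String) : Decidable (Spec_get_decimal_samples base_sentences target_count out) := by unfold Spec_get_decimal_samples; infer_instance

-- ===== CLAIM (what is proved, stated in full; the proofs are below) =====
def Claim_equal_get_decimal_samples : Prop := ∀ (base_sentences : List String) (target_count : Int), Dom_get_decimal_samples base_sentences target_count → Pre_get_decimal_samples base_sentences target_count → Spec_get_decimal_samples base_sentences target_count (get_decimal_samples base_sentences target_count)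

-- ===== LEMMAS AND PROOFS =====
-- Loop invariant: truncating either accumulator of A's loop at target_count equals truncating the
-- corresponding full filtered list, because the break only fires once both accumulators hold ≥ target_count items.
lemma pvALoop_take (t : Int) (ht : 0 ≤ t) :
    ∀ (l negative_sentences positive_sentences : List String),
      (pvALoop t l negative_sentences positive_sentences).1.take t.toNat
        = (negative_sentences ++ l.filter (fun s => !pvHasDigit s)).take t.toNat
      ∧ (pvALoop t l negative_sentences positive_sentences).2.take t.toNat
        = (positive_sentences ++ l.filter pvHasDigit).take t.toNat := by
  intro l
  induction l with
  | nil => intro neg pos; simp [pvALoop]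
  | cons s rest ih =>
    intro neg pos
    by_cases hd : pvHasDigit s
    · rw [show (s :: rest).filter (fun s => !pvHasDigit s) = rest.filter (fun s => !pvHasDigit s)
            by simp [hd],
          show (s :: rest).filter pvHasDigit = s :: rest.filter pvHasDigit
            by simp [hd],
          show pos ++ s :: rest.filter pvHasDigit = (pos ++ [s]) ++ rest.filter pvHasDigit by simp]
      simp only [pvALoop, hd, if_true]
      split_ifs with hb
      · obtain ⟨hb1, hb2⟩ := hb
        simp only [PySem.List.len_eq, List.length_append, List.length_cons, List.length_nil] at hb1 hb2
        exact ⟨(List.take_append_of_le_length (by (try simp); omega)).symm,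
               (List.take_append_of_le_length (by (try simp); omega)).symm⟩
      · exact ih neg (pos ++ [s])
    · rw [show (s :: rest).filter (fun s => !pvHasDigit s) = s :: rest.filter (fun s => !pvHasDigit s)
            by simp [hd],
          show (s :: rest).filter pvHasDigit = rest.filter pvHasDigit
            by simp [hd],
          show neg ++ s :: rest.filter (fun s => !pvHasDigit s)
            = (neg ++ [s]) ++ rest.filter (fun s => !pvHasDigit s) by simp]
      simp only [pvALoop, hd, if_false, Bool.false_eq_true]
      split_ifs with hb
      · obtain ⟨hb1, hb2⟩ := hb
        simp only [PySem.List.len_eq, List.length_append, List.length_cons, List.length_nil] at hb1 hb2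
        exact ⟨(List.take_append_of_le_length (by (try simp); omega)).symm,
               (List.take_append_of_le_length (by (try simp); omega)).symm⟩
      · exact ih (neg ++ [s]) pos

-- With target_count < 0 the loop's break condition holds after the first iteration, so A's accumulators
-- together hold at most one sentence.
lemma pvALoop_len_neg (t : Int) (htn : t < 0) (l : List String) :
    (pvALoop t l [] []).1.length ≤ 1 ∧ (pvALoop t l [] []).2.length ≤ 1 := by
  cases l with
  | nil => constructor <;> simp [pvALoop]
  | cons s rest =>
    have h0 : ∀ xs : List String, t ≤ PySem.List.len xs := by
      intro xs; simp only [PySem.List.len_eq]; omega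
    by_cases hd : pvHasDigit s <;>
      · simp only [pvALoop, hd, if_true, if_false, Bool.false_eq_true]
        rw [if_pos ⟨h0 _, h0 _⟩]
        constructor <;> simp

-- xs[:t] for negative t is empty as soon as xs has at most -t elements.
lemma pvSliceNegNil (t : Int) (htn : t < 0) (xs : List String) (hx : xs.length ≤ (-t).toNat) :
    PySem.List.slice xs none (some t) = [] := by
  have hk : t = -(((-t).toNat : Nat) : Int) := by omega
  rw [hk, PySem.List.slice_to_neg_natCast _ _ (by omega)]
  simp [Nat.sub_eq_zero_of_le hx]

-- ===== VERDICT (by name: the statement is the Claim_ definition above) =====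
theorem get_decimal_samples_spec : Claim_equal_get_decimal_samples := by
  intro bs t _ ht
  by_cases h0 : (0 : Int) ≤ t
  case neg =>
    have htn : t < 0 := by omega
    unfold Pre_get_decimal_samples at ht
    rcases ht with h | ⟨h1, h2⟩
    · omega
    · unfold Spec_get_decimal_samples get_decimal_samples get_decimal_samples_alt
      have hA := pvALoop_len_neg t htn bs
      have hk1 : (1 : Nat) ≤ (-t).toNat := by omega
      simp only [pvSliceNegNil t htn _ (le_trans hA.1 hk1),
          pvSliceNegNil t htn _ (le_trans hA.2 hk1),
          pvSliceNegNil t htn _ (by rw [← List.countP_eq_length_filter]; exact h2),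
          pvSliceNegNil t htn _ (by rw [← List.countP_eq_length_filter]; exact h1)]
  case pos =>
  have ht' : (0 : Int) ≤ t := h0
  unfold Spec_get_decimal_samples get_decimal_samples get_decimal_samples_alt
  have h := pvALoop_take t ht' bs [] []
  simp only [List.nil_append] at h
  have hs : ∀ xs : List String, PySem.List.slice xs none (some t) = xs.take t.toNat :=
    fun xs => PySem.List.slice_to xs ht'
  simp only [hs]
  rw [h.1, h.2]
  rfl
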